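-- pv_equiv track=rewrite | github.com/chengnani1/llmmui | src/analy_pipline/judge/run_rule_judgement.py | judge_chain
-- ===== SOURCE A (Python) =====
-- from typing import Any, Dict, List, Optional, Set, Tuple
--
-- CLEARLY_ALLOWED = "CLEARLY_ALLOWED"
--
-- CLEARLY_PROHIBITED = "CLEARLY_PROHIBITED"
--
-- NEEDS_REVIEW = "NEEDS_REVIEW"
--
-- LOW_RISK = "LOW_RISK"
--
-- MEDIUM_RISK = "MEDIUM_RISK"
--
-- HIGH_RISK = "HIGH_RISK"
--
-- def judge_permission(scene: str, permission: str, rules: Dict[str, Any]) -> Tuple[str, str]: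
--     rule = rules.get(scene)
--     if not rule:
--         return NEEDS_REVIEW, f"scene={scene} not found in rule base"
--
--     if permission in rule.get("clearly_allowed", []):
--         return CLEARLY_ALLOWED, f"{permission} in clearly_allowed for scene={scene}"
--     if permission in rule.get("clearly_prohibited", []):
--         return CLEARLY_PROHIBITED, f"{permission} in clearly_prohibited for scene={scene}"
--     if permission in rule.get("needs_review", []):
--         return NEEDS_REVIEW, f"{permission} in needs_review for scene={scene}"
--     return NEEDS_REVIEW, f"{permission} not covered by scene={scene} rule"
--
-- def judge_chain(scene: str, permissions: List[str], rules: Dict[str, Any]) -> Tuple[Dict[str, str], str, List[Dict[str, str]]]: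
--     decisions: Dict[str, str] = {}
--     matched_rules: List[Dict[str, str]] = []
--     score = 0
--
--     for p in permissions:
--         d, evidence = judge_permission(scene, p, rules)
--         decisions[p] = d
--         matched_rules.append({"permission": p, "decision": d, "evidence": evidence})
--         if d == CLEARLY_PROHIBITED:
--             score += 2
--         elif d == NEEDS_REVIEW:
--             score += 1
--
--     if score >= 2:
--         overall = HIGH_RISK
--     elif score == 1:
--         overall = MEDIUM_RISK
--     else:
--         overall = LOW_RISK
--     return decisions, overall, matched_rules
-- ===== SOURCE B (Python) =====
-- from typing import Any, Dict, List, Tuple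
--
-- CLEARLY_ALLOWED = "CLEARLY_ALLOWED"
-- CLEARLY_PROHIBITED = "CLEARLY_PROHIBITED"
-- NEEDS_REVIEW = "NEEDS_REVIEW"
-- LOW_RISK = "LOW_RISK"
-- MEDIUM_RISK = "MEDIUM_RISK"
-- HIGH_RISK = "HIGH_RISK"
--
--
-- def judge_chain(scene: str, permissions: List[str], rules: Dict[str, Any]) -> Tuple[Dict[str, str], str, List[Dict[str, str]]]:
--     rule = rules.get(scene)
--     if not rule:
--         results = [(p, NEEDS_REVIEW, f"scene={scene} not found in rule base") for p in permissions]
--     else: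
--         # Invert the rule once into a permission -> (decision, evidence) index.
--         # Categories are inserted lowest-priority first so a later (higher-priority)
--         # category overwrites, matching the allowed > prohibited > review precedence.
--         index = {}
--         for cat, dec in (("needs_review", NEEDS_REVIEW),
--                          ("clearly_prohibited", CLEARLY_PROHIBITED),
--                          ("clearly_allowed", CLEARLY_ALLOWED)):
--             for q in rule.get(cat, []):
--                 index[q] = (dec, f"{q} in {cat} for scene={scene}")
--         results = [(p,) + index.get(p, (NEEDS_REVIEW, f"{p} not covered by scene={scene} rule"))
--                    for p in permissions]
--     decisions = {p: d for p, d, _ in results}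
--     matched_rules = [{"permission": p, "decision": d, "evidence": e} for p, d, e in results]
--     prohibited = sum(1 for _, d, _ in results if d == CLEARLY_PROHIBITED)
--     review = sum(1 for _, d, _ in results if d == NEEDS_REVIEW)
--     if prohibited >= 1 or review >= 2:
--         overall = HIGH_RISK
--     elif review == 1:
--         overall = MEDIUM_RISK
--     else:
--         overall = LOW_RISK
--     return decisions, overall, matched_rules
-- ===== Notes on version B (the rewrite author's own statement) =====
-- stated objective: alternative
-- what changed: Instead of A's per-permission three-way membership scan with a running weighted score, B inverts the scene rule once into a permission->(decision,evidence) dictionary (lowest-priority category inserted first so higher-priority categories overwrite), answers each permission by one dictionary lookup, and derives overall risk from closed-form counts of CLEARLY_PROHIBITED and NEEDS_REVIEW decisions instead of the accumulated score.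
import Mathlib
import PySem

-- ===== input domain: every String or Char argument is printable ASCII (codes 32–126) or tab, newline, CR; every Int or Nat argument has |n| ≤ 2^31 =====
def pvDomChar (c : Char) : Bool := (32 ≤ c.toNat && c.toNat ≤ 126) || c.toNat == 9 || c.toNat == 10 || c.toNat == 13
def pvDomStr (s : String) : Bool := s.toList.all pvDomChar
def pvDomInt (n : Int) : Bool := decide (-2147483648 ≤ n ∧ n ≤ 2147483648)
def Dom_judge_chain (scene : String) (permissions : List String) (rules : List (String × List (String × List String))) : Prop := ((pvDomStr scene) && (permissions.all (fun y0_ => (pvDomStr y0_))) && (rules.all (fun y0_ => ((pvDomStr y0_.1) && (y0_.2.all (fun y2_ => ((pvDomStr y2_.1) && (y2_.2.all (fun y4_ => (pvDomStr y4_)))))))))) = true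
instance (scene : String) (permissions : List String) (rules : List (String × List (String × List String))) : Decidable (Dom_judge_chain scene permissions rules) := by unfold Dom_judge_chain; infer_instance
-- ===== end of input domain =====

-- B inverts the scene rule into a permission->(decision,evidence) index and derives risk from decision counts.
-- ===== PORT A =====
def judge_permission (scene : String) (permission : String) (rules : List (String × List (String × List String))) : String × String :=
  match (PySem.Dict.mk rules).get? scene with
  | none => ("NEEDS_REVIEW", "scene=" ++ scene ++ " not found in rule base")
  | some rule =>
    if rule = [] then ("NEEDS_REVIEW", "scene=" ++ scene ++ " not found in rule base")
    else if permission ∈ (PySem.Dict.mk rule).getD "clearly_allowed" [] then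
      ("CLEARLY_ALLOWED", permission ++ " in clearly_allowed for scene=" ++ scene)
    else if permission ∈ (PySem.Dict.mk rule).getD "clearly_prohibited" [] then
      ("CLEARLY_PROHIBITED", permission ++ " in clearly_prohibited for scene=" ++ scene)
    else if permission ∈ (PySem.Dict.mk rule).getD "needs_review" [] then
      ("NEEDS_REVIEW", permission ++ " in needs_review for scene=" ++ scene)
    else
      ("NEEDS_REVIEW", permission ++ " not covered by scene=" ++ scene ++ " rule")

def judge_chain (scene : String) (permissions : List String) (rules : List (String × List (String × List String))) : (List (String × String)) × String × (List (List (String × String))) :=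
  let st := permissions.foldl
    (fun (st : PySem.Dict String String × List (List (String × String)) × Int) p =>
      let de := judge_permission scene p rules
      let decisions := st.1.insert p de.1
      let matched := st.2.1 ++ [[("permission", p), ("decision", de.1), ("evidence", de.2)]]
      let score := if de.1 = "CLEARLY_PROHIBITED" then st.2.2 + 2
                   else if de.1 = "NEEDS_REVIEW" then st.2.2 + 1
                   else st.2.2
      (decisions, matched, score))
    (PySem.Dict.empty, [], 0)
  let overall := if st.2.2 ≥ 2 then "HIGH_RISK" else if st.2.2 = 1 then "MEDIUM_RISK" else "LOW_RISK"
  (st.1.items, overall, st.2.1)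

-- ===== PORT B =====
def judge_chain_alt (scene : String) (permissions : List String) (rules : List (String × List (String × List String))) : (List (String × String)) × String × (List (List (String × String))) :=
  let notFound : List (String × String × String) :=
    permissions.map (fun p => (p, "NEEDS_REVIEW", "scene=" ++ scene ++ " not found in rule base"))
  let results : List (String × String × String) :=
    match (PySem.Dict.mk rules).get? scene with
    | none => notFound
    | some rule =>
      if rule = [] then notFound
      else
        let index : PySem.Dict String (String × String) :=
          [("needs_review", "NEEDS_REVIEW"),
           ("clearly_prohibited", "CLEARLY_PROHIBITED"),
           ("clearly_allowed", "CLEARLY_ALLOWED")].foldl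
            (fun idx cd =>
              ((PySem.Dict.mk rule).getD cd.1 []).foldl
                (fun (idx : PySem.Dict String (String × String)) q =>
                  idx.insert q (cd.2, q ++ " in " ++ cd.1 ++ " for scene=" ++ scene)) idx)
            PySem.Dict.empty
        permissions.map (fun p =>
          let de := index.getD p ("NEEDS_REVIEW", p ++ " not covered by scene=" ++ scene ++ " rule")
          (p, de.1, de.2))
  let decisions := results.foldl (fun (d : PySem.Dict String String) r => d.insert r.1 r.2.1) PySem.Dict.empty
  let matched := results.map (fun r => [("permission", r.1), ("decision", r.2.1), ("evidence", r.2.2)])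
  let prohibited := results.countP (fun r => r.2.1 = "CLEARLY_PROHIBITED")
  let review := results.countP (fun r => r.2.1 = "NEEDS_REVIEW")
  let overall := if 1 ≤ prohibited ∨ 2 ≤ review then "HIGH_RISK"
                 else if review = 1 then "MEDIUM_RISK" else "LOW_RISK"
  (decisions.items, overall, matched)

-- ===== PRECONDITION & SPEC =====
def Spec_judge_chain (scene : String) (permissions : List String) (rules : List (String × List (String × List String))) (out : (List (String × String)) × String × (List (List (String × String)))) : Prop := out = judge_chain_alt scene permissions rules
instance (scene : String) (permissions : List String) (rules : List (String × List (String × List String))) (out : (List (String × String)) × String × (List (List (String × String)))) : Decidable (Spec_judge_chain scene permissions rules out) := by unfold Spec_judge_chain; infer_instance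

-- ===== CLAIM =====
def Claim_equal_judge_chain : Prop := ∀ (scene : String) (permissions : List String) (rules : List (String × List (String × List String))), Dom_judge_chain scene permissions rules → Spec_judge_chain scene permissions rules (judge_chain scene permissions rules)

-- ===== LEMMAS AND PROOFS =====

-- Reassociate a four-part concatenation so the literal middle chunks merge.
lemma app_chunk (q b c d s e : String) (h : b ++ c ++ d = e) : q ++ b ++ c ++ d ++ s = q ++ e ++ s := by
  rw [← h]; simp [String.append_assoc]

-- Lookup in a dict built by folding inserts whose value depends only on the key.
lemma getD_foldl_insert_fn {ν : Type} (f : String → ν) (dflt : ν) :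
    ∀ (L : List String) (d : PySem.Dict String ν) (q : String),
      (L.foldl (fun d p => d.insert p (f p)) d).getD q dflt
        = if q ∈ L then f q else d.getD q dflt := by
  intro L
  induction L with
  | nil => intro d q; simp
  | cons p rest ih =>
    intro d q
    simp only [List.foldl_cons, ih, List.mem_cons, PySem.Dict.getD_insert]
    by_cases hq : q ∈ rest
    · simp [hq]
    · by_cases hp : q = p <;> simp [hq, hp]

-- B's index lookup computes exactly A's three-way cascade.
lemma index_getD (scene q : String) (rule : List (String × List String)) :
    (([("needs_review", "NEEDS_REVIEW"),
       ("clearly_prohibited", "CLEARLY_PROHIBITED"),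
       ("clearly_allowed", "CLEARLY_ALLOWED")].foldl
        (fun idx cd =>
          ((PySem.Dict.mk rule).getD cd.1 []).foldl
            (fun (idx : PySem.Dict String (String × String)) q =>
              idx.insert q (cd.2, q ++ " in " ++ cd.1 ++ " for scene=" ++ scene)) idx)
        PySem.Dict.empty).getD q ("NEEDS_REVIEW", q ++ " not covered by scene=" ++ scene ++ " rule"))
    = (if q ∈ (PySem.Dict.mk rule).getD "clearly_allowed" [] then
         ("CLEARLY_ALLOWED", q ++ " in clearly_allowed for scene=" ++ scene)
       else if q ∈ (PySem.Dict.mk rule).getD "clearly_prohibited" [] then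
         ("CLEARLY_PROHIBITED", q ++ " in clearly_prohibited for scene=" ++ scene)
       else if q ∈ (PySem.Dict.mk rule).getD "needs_review" [] then
         ("NEEDS_REVIEW", q ++ " in needs_review for scene=" ++ scene)
       else ("NEEDS_REVIEW", q ++ " not covered by scene=" ++ scene ++ " rule")) := by
  simp only [List.foldl_cons, List.foldl_nil,
    getD_foldl_insert_fn (fun p => (("CLEARLY_ALLOWED" : String), p ++ " in " ++ "clearly_allowed" ++ " for scene=" ++ scene)),
    getD_foldl_insert_fn (fun p => (("CLEARLY_PROHIBITED" : String), p ++ " in " ++ "clearly_prohibited" ++ " for scene=" ++ scene)),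
    getD_foldl_insert_fn (fun p => (("NEEDS_REVIEW" : String), p ++ " in " ++ "needs_review" ++ " for scene=" ++ scene)),
    PySem.Dict.getD_empty]
  split_ifs <;> first | rfl | exact congrArg₂ Prod.mk rfl (app_chunk _ _ _ _ _ _ rfl)

-- On every branch, B's result triple at p is (p, judge_permission scene p rules).
lemma results_eq (scene : String) (permissions : List String) (rules : List (String × List (String × List String))) :
    (match (PySem.Dict.mk rules).get? scene with
     | none => permissions.map (fun p => (p, ("NEEDS_REVIEW" : String), "scene=" ++ scene ++ " not found in rule base"))
     | some rule =>
       if rule = [] then permissions.map (fun p => (p, ("NEEDS_REVIEW" : String), "scene=" ++ scene ++ " not found in rule base"))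
       else
         let index : PySem.Dict String (String × String) :=
           [("needs_review", "NEEDS_REVIEW"),
            ("clearly_prohibited", "CLEARLY_PROHIBITED"),
            ("clearly_allowed", "CLEARLY_ALLOWED")].foldl
             (fun idx cd =>
               ((PySem.Dict.mk rule).getD cd.1 []).foldl
                 (fun (idx : PySem.Dict String (String × String)) q =>
                   idx.insert q (cd.2, q ++ " in " ++ cd.1 ++ " for scene=" ++ scene)) idx)
             PySem.Dict.empty
         permissions.map (fun p =>
           let de := index.getD p ("NEEDS_REVIEW", p ++ " not covered by scene=" ++ scene ++ " rule")
           (p, de.1, de.2)))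
    = permissions.map (fun p => (p, (judge_permission scene p rules).1, (judge_permission scene p rules).2)) := by
  unfold judge_permission
  cases h : (PySem.Dict.mk rules).get? scene with
  | none => simp
  | some rule =>
    by_cases hr : rule = []
    · simp [hr]
    · simp only [hr, if_false]
      refine List.map_congr_left (fun p _ => ?_)
      simp only [index_getD]

-- Characterisation of A's fold: each component in closed form over the permission list.
lemma foldA_char (scene : String) (rules : List (String × List (String × List String))) :
    ∀ (perms : List String) (dec : PySem.Dict String String)
      (mat : List (List (String × String))) (sc : Int),
      perms.foldl
        (fun (st : PySem.Dict String String × List (List (String × String)) × Int) p =>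
          let de := judge_permission scene p rules
          let decisions := st.1.insert p de.1
          let matched := st.2.1 ++ [[("permission", p), ("decision", de.1), ("evidence", de.2)]]
          let score := if de.1 = "CLEARLY_PROHIBITED" then st.2.2 + 2
                       else if de.1 = "NEEDS_REVIEW" then st.2.2 + 1
                       else st.2.2
          (decisions, matched, score))
        (dec, mat, sc)
      = (perms.foldl (fun (d : PySem.Dict String String) p =>
            d.insert p (judge_permission scene p rules).1) dec,
         mat ++ perms.map (fun p =>
            [("permission", p), ("decision", (judge_permission scene p rules).1),
             ("evidence", (judge_permission scene p rules).2)]),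
         sc + 2 * (perms.countP (fun p => (judge_permission scene p rules).1 = "CLEARLY_PROHIBITED"))
            + (perms.countP (fun p => (judge_permission scene p rules).1 = "NEEDS_REVIEW"))) := by
  intro perms
  induction perms with
  | nil => intro dec mat sc; simp
  | cons p rest ih =>
    intro dec mat sc
    simp only [List.foldl_cons, List.map_cons, List.countP_cons, ih]
    refine congrArg₂ Prod.mk rfl (congrArg₂ Prod.mk (by simp) ?_)
    by_cases hP : (judge_permission scene p rules).1 = "CLEARLY_PROHIBITED"
    · have hR : ¬ (judge_permission scene p rules).1 = "NEEDS_REVIEW" := by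
        rw [hP]; decide
      simp [hP]; omega
    · by_cases hR : (judge_permission scene p rules).1 = "NEEDS_REVIEW"
      · simp [hR]; omega
      · simp [hP, hR]

-- ===== VERDICT =====
theorem judge_chain_spec : Claim_equal_judge_chain := by
  intro scene permissions rules _
  unfold Spec_judge_chain
  show judge_chain scene permissions rules = _
  unfold judge_chain judge_chain_alt
  rw [foldA_char]
  simp only []
  rw [results_eq]
  simp only [List.foldl_map, List.countP_map, List.map_map, Function.comp_def]
  refine congrArg₂ Prod.mk rfl (congrArg₂ Prod.mk ?_ rfl)
  simp only [zero_add]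
  split_ifs <;> first | rfl | (exfalso; omega)
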